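-- pv_equiv track=rewrite | github.com/jhonattanrgc21/python-exercises | strings/count_characters.py | verify_text
-- ===== SOURCE A (Python) =====
-- def verify_text(text: str):
--     vocals = {'a': 0, 'e': 0, 'i': 0, 'o': 0, 'u': 0}
--     count_spaces = 0
--     count_characters = 0
--
--     for letter in text:
--         if(letter.lower() in vocals):
--             vocals[letter.lower()] += 1
--         elif letter.isspace():
--             count_spaces += 1
--         elif not letter.isdigit() and not letter.isalpha():
--             count_characters += 1
--     return vocals, count_spaces, count_characters
-- ===== SOURCE B (Python) =====
-- def verify_text(text: str):
--     lowered = [c.lower() for c in text]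
--     vocals = {v: lowered.count(v) for v in 'aeiou'}
--     count_spaces = sum(1 for c in text if c.isspace())
--     count_characters = sum(
--         1 for c in text
--         if not c.isspace() and not c.isdigit() and not c.isalpha()
--     )
--     return vocals, count_spaces, count_characters
-- ===== Notes on version B (the rewrite author's own statement) =====
-- stated objective: alternative
-- what changed: Replaced the single branching pass with a dict of running counters by a per-vowel count over a lowered character list plus two independent filtered sums for spaces and special characters.
import Mathlib
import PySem

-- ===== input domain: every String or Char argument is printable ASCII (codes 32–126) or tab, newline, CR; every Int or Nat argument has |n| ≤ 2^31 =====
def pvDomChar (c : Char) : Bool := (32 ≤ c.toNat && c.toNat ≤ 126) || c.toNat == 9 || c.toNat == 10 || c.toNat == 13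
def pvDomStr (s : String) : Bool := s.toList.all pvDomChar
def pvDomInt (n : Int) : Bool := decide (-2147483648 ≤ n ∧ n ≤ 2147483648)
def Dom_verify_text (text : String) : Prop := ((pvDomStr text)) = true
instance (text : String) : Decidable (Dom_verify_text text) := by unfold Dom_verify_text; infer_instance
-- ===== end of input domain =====

-- B replaces A's single branching pass (dict of running counters) by one count per vowel over a
-- lowered character list plus two independent filtered sums; alternative decomposition, same cost.

-- ===== PORT A =====
-- one iteration of A's for-loop: state = (vocals dict, count_spaces, count_characters)
def vtStep (st : PySem.Dict String Int × Int × Int) (letter : Char) :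
    PySem.Dict String Int × Int × Int :=
  let lw : String := String.singleton (PySem.Chars.lowerChar letter)
  if st.1.contains lw then
    (st.1.insert lw (st.1.getD lw 0 + 1), st.2.1, st.2.2)
  else if PySem.Chars.isspace letter then
    (st.1, st.2.1 + 1, st.2.2)
  else if !PySem.Chars.isdigit letter && !PySem.Chars.isalpha letter then
    (st.1, st.2.1, st.2.2 + 1)
  else st

def verify_text (text : String) : (List (String × Int)) × Int × Int :=
  let vocals : PySem.Dict String Int :=
    PySem.Dict.ofList [("a", 0), ("e", 0), ("i", 0), ("o", 0), ("u", 0)]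
  let r := text.toList.foldl vtStep (vocals, 0, 0)
  (r.1.items, r.2.1, r.2.2)

-- ===== PORT B =====
def verify_text_alt (text : String) : (List (String × Int)) × Int × Int :=
  let lowered := text.toList.map (fun c => String.singleton (PySem.Chars.lowerChar c))
  let vocals := (["a", "e", "i", "o", "u"] : List String).map
    (fun v => (v, (lowered.count v : Int)))
  let count_spaces :=
    (text.toList.map (fun c => if PySem.Chars.isspace c then (1 : Int) else 0)).sum
  let count_characters :=
    (text.toList.map (fun c =>
      if !PySem.Chars.isspace c && !PySem.Chars.isdigit c && !PySem.Chars.isalpha c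
      then (1 : Int) else 0)).sum
  (vocals, count_spaces, count_characters)

-- ===== PRECONDITION & SPEC =====
def Spec_verify_text (text : String) (out : (List (String × Int)) × Int × Int) : Prop := out = verify_text_alt text
instance (text : String) (out : (List (String × Int)) × Int × Int) : Decidable (Spec_verify_text text out) := by unfold Spec_verify_text; infer_instance

-- ===== CLAIM (what is proved, stated in full; the proofs are below) =====
def Claim_equal_verify_text : Prop := ∀ (text : String), Dom_verify_text text → Spec_verify_text text (verify_text text)

-- ===== LEMMAS AND PROOFS =====

-- number of characters of l whose lowercased form is v
def vcnt (v : Char) (l : List Char) : Int := ((l.map PySem.Chars.lowerChar).count v : Int)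

def othP (c : Char) : Bool :=
  !PySem.Chars.isspace c && !PySem.Chars.isdigit c && !PySem.Chars.isalpha c

theorem sing_inj (x v : Char) : (String.singleton x = String.singleton v) ↔ x = v := by
  constructor
  · intro h; have := congrArg String.toList h; simpa using this
  · intro h; rw [h]

theorem sing_beq (x v : Char) : (String.singleton x == String.singleton v) = (x == v) := by
  by_cases h : x = v
  · simp [h]
  · simp [h, sing_inj]

-- a character whose lowercased form is a vowel is alphabetic and not whitespace
theorem lower_vowel (ch v : Char) (hv : v ∈ (['a', 'e', 'i', 'o', 'u'] : List Char))
    (h : PySem.Chars.lowerChar ch = v) :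
    PySem.Chars.isalpha ch = true ∧ PySem.Chars.isspace ch = false := by
  have hv' : v = 'a' ∨ v = 'e' ∨ v = 'i' ∨ v = 'o' ∨ v = 'u' := by simpa using hv
  have hvn : v.toNat = 97 ∨ v.toNat = 101 ∨ v.toNat = 105 ∨ v.toNat = 111 ∨ v.toNat = 117 := by
    rcases hv' with h | h | h | h | h <;> subst h <;> simp
  unfold PySem.Chars.lowerChar at h
  by_cases hu : PySem.Chars.isupper ch = true
  · refine ⟨by simp [PySem.Chars.isalpha, hu], ?_⟩
    unfold PySem.Chars.isupper at hu
    simp [Char.le_def, UInt32.le_iff_toNat_le, Char.toNat_val] at hu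
    unfold PySem.Chars.isspace
    simp
    omega
  · rw [if_neg hu] at h
    subst h
    unfold PySem.Chars.isupper at hu
    simp [Char.le_def, UInt32.le_iff_toNat_le, Char.toNat_val] at hu hvn
    constructor
    · simp [PySem.Chars.isalpha, PySem.Chars.islower, Char.le_def, UInt32.le_iff_toNat_le,
        Char.toNat_val]
      omega
    · unfold PySem.Chars.isspace
      simp
      omega

theorem vcnt_nil (v : Char) : vcnt v [] = 0 := by simp [vcnt]

theorem vcnt_cons (v ch : Char) (l : List Char) :
    vcnt v (ch :: l) = vcnt v l + (if PySem.Chars.lowerChar ch = v then 1 else 0) := by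
  by_cases h : PySem.Chars.lowerChar ch = v <;> simp [vcnt, h]

theorem vt_step_eval (x1 x2 x3 x4 x5 s k : Int) (ch : Char) :
    vtStep (PySem.Dict.mk [("a", x1), ("e", x2), ("i", x3), ("o", x4), ("u", x5)], s, k) ch =
      (PySem.Dict.mk [("a", x1 + (if PySem.Chars.lowerChar ch = 'a' then 1 else 0)),
        ("e", x2 + (if PySem.Chars.lowerChar ch = 'e' then 1 else 0)),
        ("i", x3 + (if PySem.Chars.lowerChar ch = 'i' then 1 else 0)),
        ("o", x4 + (if PySem.Chars.lowerChar ch = 'o' then 1 else 0)),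
        ("u", x5 + (if PySem.Chars.lowerChar ch = 'u' then 1 else 0))],
       s + (if PySem.Chars.isspace ch then 1 else 0),
       k + (if othP ch then 1 else 0)) := by
  by_cases hvw : PySem.Chars.lowerChar ch ∈ (['a', 'e', 'i', 'o', 'u'] : List Char)
  · obtain ⟨ha, hs⟩ := lower_vowel ch _ hvw rfl
    have hoth : othP ch = false := by simp [othP, ha]
    have hvw' : PySem.Chars.lowerChar ch = 'a' ∨ PySem.Chars.lowerChar ch = 'e' ∨
        PySem.Chars.lowerChar ch = 'i' ∨ PySem.Chars.lowerChar ch = 'o' ∨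
        PySem.Chars.lowerChar ch = 'u' := by simpa using hvw
    rcases hvw' with h | h | h | h | h <;>
      simp [vtStep, h, hs, hoth, PySem.Dict.getD_eq_get?_getD, PySem.Dict.get?_mk_cons,
        PySem.Dict.items_insert_of_contains, PySem.Dict.ext_iff,
        show String.singleton 'a' = "a" from rfl, show String.singleton 'e' = "e" from rfl,
        show String.singleton 'i' = "i" from rfl, show String.singleton 'o' = "o" from rfl,
        show String.singleton 'u' = "u" from rfl]
  · have hvw' : PySem.Chars.lowerChar ch ≠ 'a' ∧ PySem.Chars.lowerChar ch ≠ 'e' ∧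
        PySem.Chars.lowerChar ch ≠ 'i' ∧ PySem.Chars.lowerChar ch ≠ 'o' ∧
        PySem.Chars.lowerChar ch ≠ 'u' := by
      refine ⟨?_, ?_, ?_, ?_, ?_⟩ <;> intro h <;> exact hvw (by simp [h])
    obtain ⟨h1, h2, h3, h4, h5⟩ := hvw'
    have hcon : (PySem.Dict.mk [(("a" : String), x1), ("e", x2), ("i", x3), ("o", x4),
        ("u", x5)]).contains (String.singleton (PySem.Chars.lowerChar ch)) = false := by
      rw [show ("a" : String) = String.singleton 'a' from rfl,
        show ("e" : String) = String.singleton 'e' from rfl,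
        show ("i" : String) = String.singleton 'i' from rfl,
        show ("o" : String) = String.singleton 'o' from rfl,
        show ("u" : String) = String.singleton 'u' from rfl, PySem.Dict.contains_mk]
      simp [sing_beq, Ne.symm h1, Ne.symm h2, Ne.symm h3, Ne.symm h4, Ne.symm h5]
    by_cases hsp : PySem.Chars.isspace ch = true
    · have hoth : othP ch = false := by simp [othP, hsp]
      simp [vtStep, hcon, hsp, hoth, h1, h2, h3, h4, h5]
    · have hsp' : PySem.Chars.isspace ch = false := by simpa using hsp
      by_cases hdg : (!PySem.Chars.isdigit ch && !PySem.Chars.isalpha ch) = true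
      · rw [Bool.and_eq_true, Bool.not_eq_true', Bool.not_eq_true'] at hdg
        have hoth : othP ch = true := by simp [othP, hsp', hdg.1, hdg.2]
        simp [vtStep, hcon, hsp', hdg.1, hdg.2, hoth, h1, h2, h3, h4, h5]
      · have hoth : othP ch = false := by
          simp only [othP, hsp', Bool.not_false, Bool.true_and]
          simpa using hdg
        simp [vtStep, hcon, hsp', hoth, h1, h2, h3, h4, h5]
        intro hd
        simpa [hd] using hdg

theorem vt_fold (l : List Char) (x1 x2 x3 x4 x5 s k : Int) :
    List.foldl vtStep (PySem.Dict.mk [("a", x1), ("e", x2), ("i", x3), ("o", x4), ("u", x5)], s, k) l =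
      (PySem.Dict.mk [("a", x1 + vcnt 'a' l), ("e", x2 + vcnt 'e' l), ("i", x3 + vcnt 'i' l),
        ("o", x4 + vcnt 'o' l), ("u", x5 + vcnt 'u' l)],
       s + (l.countP PySem.Chars.isspace : Int), k + (l.countP othP : Int)) := by
  induction l generalizing x1 x2 x3 x4 x5 s k with
  | nil => simp [vcnt_nil]
  | cons ch l ih =>
    rw [List.foldl_cons, vt_step_eval, ih]
    simp [PySem.Dict.ext_iff, vcnt_cons, List.countP_cons]
    refine ⟨⟨?_, ?_, ?_, ?_, ?_⟩, ?_, ?_⟩ <;> split_ifs <;> omega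

theorem count_singleton_map (v : Char) (l : List Char) :
    (l.map (fun c => String.singleton (PySem.Chars.lowerChar c))).count (String.singleton v) =
      (l.map PySem.Chars.lowerChar).count v := by
  have hinj : Function.Injective String.singleton := fun a b h => (sing_inj a b).mp h
  rw [show (fun c => String.singleton (PySem.Chars.lowerChar c)) =
      String.singleton ∘ PySem.Chars.lowerChar from rfl, ← List.map_map,
    List.count_map_of_injective _ _ hinj]

-- ===== VERDICT (by name: the statement is the Claim_ definition above) =====
theorem verify_text_spec : Claim_equal_verify_text := by
  intro text _
  unfold Spec_verify_text verify_text verify_text_alt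
  rw [show (PySem.Dict.ofList [(("a" : String), (0 : Int)), ("e", 0), ("i", 0), ("o", 0), ("u", 0)]) =
      PySem.Dict.mk [("a", 0), ("e", 0), ("i", 0), ("o", 0), ("u", 0)] from by decide]
  simp only []
  rw [vt_fold, PySem.List.sum_map_ite_one_zero, PySem.List.sum_map_ite_one_zero]
  simp [vcnt, count_singleton_map,
    show ("a" : String) = String.singleton 'a' from rfl,
    show ("e" : String) = String.singleton 'e' from rfl,
    show ("i" : String) = String.singleton 'i' from rfl,
    show ("o" : String) = String.singleton 'o' from rfl,
    show ("u" : String) = String.singleton 'u' from rfl]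
  rfl
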